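-- pv_equiv track=rewrite | github.com/praivesi/Algorithms_2 | programmers/level3/NumberGame.py | solution
-- ===== SOURCE A (Python) =====
-- def solution(A, B):
--     ah = {}
--     for a in A:
--         if a not in ah:
--             ah[a] = 0
--         ah[a] += 1
--
--     bh = {}
--     for b in B:
--         if b not in bh:
--             bh[b] = 0
--         bh[b] += 1
--
--     aa = []
--     bb = []
--     for k, v in ah.items():
--         aa.append([k, v])
--
--     for k, v in bh.items():
--         bb.append([k, v])
--
--     aa.sort(key = lambda a: a[0])
--     bb.sort(key = lambda b: b[0])
--
--     wc = 0
--     ai = 0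
--     bi = 0
--
--     while ai < len(aa) and bi < len(bb):
--         if aa[ai][0] < bb[bi][0]:
--             if aa[ai][1] <= bb[bi][1]:
--                 wc += aa[ai][1]
--                 bb[bi][1] -= aa[ai][1]
--                 ai += 1
--                 continue
--             else:
--                 wc += bb[bi][1]
--                 aa[ai][1] -= bb[bi][1]
--                 bi += 1
--                 continue
--         else:
--             bi += 1
--
--     return wc
-- ===== SOURCE B (Python) =====
-- def solution(A, B):
--     sa = sorted(A)
--     i = 0
--     wins = 0
--     for b in sorted(B):
--         if i < len(sa) and sa[i] < b:
--             i += 1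
--             wins += 1
--     return wins
-- ===== Notes on version B (the rewrite author's own statement) =====
-- stated objective: simpler
-- what changed: Replaces the frequency-dict / run-length (value,count) two-pointer loop with per-count arithmetic by a direct per-element greedy pass: one pointer into sorted A consumed once per win while iterating sorted B.
import Mathlib
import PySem

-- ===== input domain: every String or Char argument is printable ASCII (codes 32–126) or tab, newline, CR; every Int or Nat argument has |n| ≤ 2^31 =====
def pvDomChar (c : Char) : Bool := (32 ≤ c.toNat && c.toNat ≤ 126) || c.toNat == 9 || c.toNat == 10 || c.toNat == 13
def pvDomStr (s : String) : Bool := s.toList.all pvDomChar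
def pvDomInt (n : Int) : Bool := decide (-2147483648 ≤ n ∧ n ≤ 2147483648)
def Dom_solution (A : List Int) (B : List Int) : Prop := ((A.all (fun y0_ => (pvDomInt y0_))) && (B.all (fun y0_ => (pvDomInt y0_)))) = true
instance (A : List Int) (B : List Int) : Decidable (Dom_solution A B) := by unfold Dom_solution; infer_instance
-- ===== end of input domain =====

-- B rewrites A's frequency-dict / run-length two-pointer loop as a direct per-element greedy
-- pass over the sorted lists (objective: simpler); same return value, proven below.

-- ===== PORT A =====
-- the while loop: the two index pointers become the two suffix lists; the in-place
-- mutations bb[bi][1] -= … / aa[ai][1] -= … become the rebuilt head pairs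
def solGo : List (Int × Int) → List (Int × Int) → Int
  | [], _ => 0
  | _ :: _, [] => 0
  | (ak, av) :: as_, (bk, bv) :: bs =>
    if ak < bk then
      if av ≤ bv then av + solGo as_ ((bk, bv - av) :: bs)
      else bv + solGo ((ak, av - bv) :: as_) bs
    else solGo ((ak, av) :: as_) bs
termination_by P Q => P.length + Q.length
decreasing_by all_goals simp only [List.length_cons]; omega

def solution (A : List Int) (B : List Int) : Int :=
  let ah := A.foldl (fun d a =>
    let d := if d.contains a then d else d.insert a (0 : Int)
    d.insert a (d.getD a 0 + 1)) PySem.Dict.empty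
  let bh := B.foldl (fun d b =>
    let d := if d.contains b then d else d.insert b (0 : Int)
    d.insert b (d.getD b 0 + 1)) PySem.Dict.empty
  -- 'for k, v in ah.items(): aa.append([k, v])' (the [k,v] lists become pairs)
  let aa := ah.items.foldl (fun acc kv => acc ++ [kv]) []
  let bb := bh.items.foldl (fun acc kv => acc ++ [kv]) []
  let aa := PySem.List.sorted aa (fun p => p.1) false
  let bb := PySem.List.sorted bb (fun p => p.1) false
  solGo aa bb

-- ===== PORT B =====
def solution_alt (A : List Int) (B : List Int) : Int :=
  let sa := PySem.List.sorted A (fun x => x) false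
  let sb := PySem.List.sorted B (fun x => x) false
  -- the guard i < len(sa) makes pyGet? in range, so the .getD 0 default is never used
  (sb.foldl (fun (st : Int × Int) b =>
      if st.1 < (sa.length : Int) ∧ (PySem.List.pyGet? sa st.1).getD 0 < b
      then (st.1 + 1, st.2 + 1) else st) ((0 : Int), (0 : Int))).2

-- ===== PRECONDITION & SPEC =====
def Spec_solution (A : List Int) (B : List Int) (out : Int) : Prop := out = solution_alt A B
instance (A : List Int) (B : List Int) (out : Int) : Decidable (Spec_solution A B out) := by unfold Spec_solution; infer_instance

-- ===== CLAIM (what is proved, stated in full; the proofs are below) =====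
def Claim_equal_solution : Prop := ∀ (A : List Int) (B : List Int), Dom_solution A B → Spec_solution A B (solution A B)

-- ===== LEMMAS AND PROOFS =====

-- the per-element greedy recursion both ports are reduced to
def greedy : List Int → List Int → Int
  | [], _ => 0
  | _ :: _, [] => 0
  | a :: as_, b :: bs => if a < b then 1 + greedy as_ bs else greedy (a :: as_) bs
termination_by xs ys => xs.length + ys.length
decreasing_by all_goals simp only [List.length_cons]; omega

-- flatten a (value, count) run list back to the element list
def flat (P : List (Int × Int)) : List Int := P.flatMap (fun p => List.replicate p.2.toNat p.1)

theorem flat_nil : flat [] = [] := rfl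

theorem flat_cons (p : Int × Int) (P : List (Int × Int)) :
    flat (p :: P) = List.replicate p.2.toNat p.1 ++ flat P := rfl

theorem mem_flat {P : List (Int × Int)} {x : Int} (h : x ∈ flat P) : ∃ p ∈ P, p.1 = x := by
  simp only [flat, List.mem_flatMap, List.mem_replicate] at h
  obtain ⟨p, hp, _, hx⟩ := h
  exact ⟨p, hp, hx.symm⟩

theorem greedy_nil_right (xs : List Int) : greedy xs [] = 0 := by
  cases xs <;> simp [greedy]

theorem greedy_skip (a b : Int) (xs ys : List Int) (h : ¬ a < b) :
    ∀ m, greedy (a :: xs) (List.replicate m b ++ ys) = greedy (a :: xs) ys := by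
  intro m; induction m with
  | zero => rfl
  | succ k ih =>
    rw [List.replicate_succ, List.cons_append]
    rw [show greedy (a :: xs) (b :: (List.replicate k b ++ ys)) = greedy (a :: xs) (List.replicate k b ++ ys) by simp [greedy, h]]
    exact ih

theorem greedy_consume (a b : Int) (h : a < b) :
    ∀ (k : Nat) (xs ys : List Int),
      greedy (List.replicate k a ++ xs) (List.replicate k b ++ ys) = (k : Int) + greedy xs ys := by
  intro k; induction k with
  | zero => intro xs ys; simp
  | succ n ih =>
    intro xs ys
    simp only [List.replicate_succ, List.cons_append, greedy, if_pos h, ih]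
    push_cast; ring

theorem solGo_eq_greedy :
    ∀ (N : Nat) (P Q : List (Int × Int)), (flat P).length + Q.length ≤ N →
      (∀ p ∈ P, 0 < p.2) → (∀ q ∈ Q, 0 ≤ q.2) →
      solGo P Q = greedy (flat P) (flat Q) := by
  intro N
  induction N with
  | zero =>
    intro P Q hle _ _
    have hQ : Q = [] := by cases Q with
      | nil => rfl
      | cons q Q' => simp [List.length_cons] at hle
    subst hQ
    rw [flat_nil, greedy_nil_right]
    cases P with
    | nil => simp [solGo]
    | cons p P' => obtain ⟨a, b⟩ := p; simp [solGo]
  | succ N ih =>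
    intro P Q hle hP hQpos
    cases Q with
    | nil =>
      rw [flat_nil, greedy_nil_right]
      cases P with
      | nil => simp [solGo]
      | cons p P' => obtain ⟨a, b⟩ := p; simp [solGo]
    | cons q Q' =>
      obtain ⟨bk, bv⟩ := q
      cases P with
      | nil => simp [solGo, flat_nil, greedy]
      | cons p P' =>
        obtain ⟨ak, av⟩ := p
        have hav : 0 < av := hP _ (List.mem_cons_self)
        have hbv : 0 ≤ bv := hQpos _ (List.mem_cons_self)
        have hP' : ∀ p ∈ P', 0 < p.2 := fun p hp => hP p (List.mem_cons_of_mem _ hp)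
        have hQ' : ∀ q ∈ Q', 0 ≤ q.2 := fun q hq => hQpos q (List.mem_cons_of_mem _ hq)
        have hflatlen : (flat ((ak, av) :: P')).length = av.toNat + (flat P').length := by
          simp [flat_cons]
        by_cases hbz : bv = 0
        · subst hbz
          have hsolGo : solGo ((ak, av) :: P') ((bk, 0) :: Q') = solGo ((ak, av) :: P') Q' := by
            by_cases hlt : ak < bk
            · have hna : ¬ av ≤ 0 := by omega
              simp [solGo, hlt, hna]
            · simp [solGo, hlt]
          have hfq : flat ((bk, (0 : Int)) :: Q') = flat Q' := by simp [flat_cons]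
          rw [hsolGo, hfq]
          exact ih _ _ (by simp only [List.length_cons] at hle ⊢; omega) hP hQ'
        · have hbvpos : 0 < bv := lt_of_le_of_ne hbv (Ne.symm hbz)
          by_cases hlt : ak < bk
          · by_cases hle2 : av ≤ bv
            · rw [show solGo ((ak, av) :: P') ((bk, bv) :: Q')
                    = av + solGo P' ((bk, bv - av) :: Q') from by simp [solGo, hlt, hle2]]
              have hQ'' : ∀ q ∈ (bk, bv - av) :: Q', 0 ≤ q.2 := by
                intro q hq
                rcases List.mem_cons.mp hq with h | h
                · subst h; simp; omega
                · exact hQ' q h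
              rw [ih P' ((bk, bv - av) :: Q')
                    (by simp only [List.length_cons] at hle ⊢; omega) hP' hQ'']
              have hsplit : List.replicate bv.toNat bk
                  = List.replicate av.toNat bk ++ List.replicate (bv - av).toNat bk := by
                rw [← List.replicate_add]; congr 1; omega
              rw [flat_cons ((ak, av)) P', flat_cons ((bk, bv)) Q', flat_cons ((bk, bv - av)) Q']
              simp only []
              rw [hsplit, List.append_assoc, greedy_consume ak bk hlt av.toNat]
              congr 1
              omega
            · rw [show solGo ((ak, av) :: P') ((bk, bv) :: Q')
                    = bv + solGo ((ak, av - bv) :: P') Q' from by simp [solGo, hlt, hle2]]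
              have hP'' : ∀ p ∈ (ak, av - bv) :: P', 0 < p.2 := by
                intro p hp
                rcases List.mem_cons.mp hp with h | h
                · subst h; simp; omega
                · exact hP' p h
              rw [ih ((ak, av - bv) :: P') Q'
                    (by simp only [List.length_cons, flat_cons, List.length_append,
                          List.length_replicate] at hle ⊢; omega) hP'' hQ']
              have hsplit : List.replicate av.toNat ak
                  = List.replicate bv.toNat ak ++ List.replicate (av - bv).toNat ak := by
                rw [← List.replicate_add]; congr 1; omega
              rw [flat_cons ((ak, av)) P', flat_cons ((bk, bv)) Q', flat_cons ((ak, av - bv)) P']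
              simp only []
              rw [hsplit, List.append_assoc, greedy_consume ak bk hlt bv.toNat]
              congr 1
              omega
          · rw [show solGo ((ak, av) :: P') ((bk, bv) :: Q')
                  = solGo ((ak, av) :: P') Q' from by simp [solGo, hlt]]
            rw [ih _ Q' (by simp only [List.length_cons] at hle ⊢; omega) hP hQ']
            have hhead : flat ((ak, av) :: P')
                = ak :: (List.replicate (av.toNat - 1) ak ++ flat P') := by
              have h1 : av.toNat = (av.toNat - 1) + 1 := by omega
              rw [flat_cons]
              show List.replicate av.toNat ak ++ flat P' = _
              conv_lhs => rw [h1, List.replicate_succ]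
              rw [List.cons_append]
            have hskip : greedy (flat ((ak, av) :: P')) (flat ((bk, bv) :: Q'))
                = greedy (flat ((ak, av) :: P')) (flat Q') := by
              rw [hhead, flat_cons]
              exact greedy_skip ak bk _ _ hlt bv.toNat
            exact hskip.symm

theorem foldl_app_id {α : Type} (l : List α) :
    List.foldl (fun acc x => acc ++ [x]) [] l = l := by
  simpa using PySem.List.foldl_append_singleton_eq_map (fun x => x) l []

-- A's counting loop is Counter
theorem foldl_count_eq_counter (l : List Int) :
    l.foldl (fun d a =>
      let d := if d.contains a then d else d.insert a (0 : Int)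
      d.insert a (d.getD a 0 + 1)) PySem.Dict.empty = PySem.Dict.counter l := by
  have hstep : (fun (d : PySem.Dict Int Int) a =>
      let d := if d.contains a then d else d.insert a (0 : Int)
      d.insert a (d.getD a 0 + 1)) = (fun (d : PySem.Dict Int Int) a => d.insert a (d.getD a 0 + 1)) := by
    funext d a
    by_cases h : d.contains a = true
    · simp [h]
    · simp only [h, Bool.false_eq_true, if_false]
      rw [PySem.Dict.getD_insert_self, PySem.Dict.insert_insert_self,
        PySem.Dict.getD_of_not_contains _ _ (by simpa using h)]
  rw [hstep, PySem.Dict.foldl_insert_getD_add_one_eq_counter]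

-- the sorted distinct values of l
def svals (l : List Int) : List Int := PySem.List.sorted (PySem.Set.ofList l) (fun x => x) false

-- the canonical run-length encoding of sorted l
def rle (l : List Int) : List (Int × Int) := (svals l).map (fun k => (k, (l.count k : Int)))

theorem sorted_items_eq_rle (l : List Int) :
    PySem.List.sorted ((PySem.Dict.counter l).items) (fun p : Int × Int => p.1) false = rle l := by
  apply PySem.List.sorted_eq_of_perm_of_pairwise_lt
  · rw [PySem.Dict.items_counter]
    exact List.Perm.map _ (PySem.List.sorted_perm (PySem.Set.ofList l) (fun x => x) false)
  · exact List.Pairwise.map _ (fun a b h => h) (PySem.List.sorted_ofList_pairwise_lt l)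

theorem nodup_svals (l : List Int) : (svals l).Nodup :=
  ((PySem.List.sorted_perm (PySem.Set.ofList l) (fun x => x) false).nodup_iff).mpr
    (PySem.Set.nodup_ofList l)

theorem mem_svals (l : List Int) (x : Int) : x ∈ svals l ↔ x ∈ l := by
  unfold svals
  rw [PySem.List.mem_sorted, PySem.Set.mem_ofList]

theorem count_flat_map (l : List Int) :
    ∀ (S : List Int), S.Nodup → ∀ (x : Int),
      List.count x (flat (S.map (fun k => (k, (l.count k : Int)))))
        = if x ∈ S then l.count x else 0 := by
  intro S
  induction S with
  | nil => intro _ x; simp [flat]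
  | cons k S' ih =>
    intro hnd x
    obtain ⟨hk, hnd'⟩ := List.nodup_cons.mp hnd
    rw [List.map_cons, flat_cons, List.count_append, ih hnd' x]
    by_cases hx : x = k
    · subst hx
      simp [hk]
    · simp [List.count_replicate, Ne.symm hx, hx]

theorem flat_pairwise :
    ∀ (P : List (Int × Int)), P.Pairwise (fun p q => p.1 < q.1) →
      (flat P).Pairwise (fun x y => x ≤ y) := by
  intro P
  induction P with
  | nil => intro _; simp [flat]
  | cons p P' ih =>
    intro h
    obtain ⟨hhead, htail⟩ := List.pairwise_cons.mp h
    rw [flat_cons, List.pairwise_append]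
    refine ⟨?_, ih htail, ?_⟩
    · rw [List.pairwise_replicate]
      exact Or.inr le_rfl
    · intro a ha b hb
      obtain ⟨q, hq, hq1⟩ := mem_flat hb
      rw [List.eq_of_mem_replicate ha, ← hq1]
      exact (hhead q hq).le

theorem flat_rle (l : List Int) : flat (rle l) = PySem.List.sorted l (fun x => x) false := by
  refine (PySem.List.sorted_id_eq_of_perm_of_pairwise l (flat (rle l)) ?_ ?_).symm
  · rw [List.perm_iff_count]
    intro a
    unfold rle
    rw [count_flat_map l (svals l) (nodup_svals l) a]
    by_cases ha : a ∈ l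
    · simp [(mem_svals l a).mpr ha]
    · rw [if_neg (fun h => ha ((mem_svals l a).mp h)), List.count_eq_zero.mpr ha]
  · exact flat_pairwise _
      (List.Pairwise.map _ (fun a b h => h) (PySem.List.sorted_ofList_pairwise_lt l))

theorem rle_pos (l : List Int) : ∀ p ∈ rle l, 0 < p.2 := by
  intro p hp
  obtain ⟨k, hk, hpk⟩ := List.mem_map.mp hp
  subst hpk
  have : k ∈ l := (mem_svals l k).mp hk
  simpa using List.count_pos_iff.mpr this

theorem solution_eq_greedy (A B : List Int) :
    solution A B = greedy (PySem.List.sorted A (fun x => x) false) (PySem.List.sorted B (fun x => x) false) := by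
  show (let ah := A.foldl (fun d a =>
      let d := if d.contains a then d else d.insert a (0 : Int)
      d.insert a (d.getD a 0 + 1)) PySem.Dict.empty
    let bh := B.foldl (fun d b =>
      let d := if d.contains b then d else d.insert b (0 : Int)
      d.insert b (d.getD b 0 + 1)) PySem.Dict.empty
    let aa := ah.items.foldl (fun acc kv => acc ++ [kv]) []
    let bb := bh.items.foldl (fun acc kv => acc ++ [kv]) []
    let aa := PySem.List.sorted aa (fun p => p.1) false
    let bb := PySem.List.sorted bb (fun p => p.1) false
    solGo aa bb) = _
  simp only []
  rw [foldl_count_eq_counter A, foldl_count_eq_counter B, foldl_app_id, foldl_app_id,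
    sorted_items_eq_rle A, sorted_items_eq_rle B,
    solGo_eq_greedy ((flat (rle A)).length + (rle B).length) (rle A) (rle B) le_rfl
      (rle_pos A) (fun q hq => (rle_pos B q hq).le),
    flat_rle, flat_rle]

theorem alt_loop (sa : List Int) (sb : List Int) :
    ∀ (n : Nat) (w : Int),
      (sb.foldl (fun (st : Int × Int) b =>
        if st.1 < (sa.length : Int) ∧ (PySem.List.pyGet? sa st.1).getD 0 < b
        then (st.1 + 1, st.2 + 1) else st) ((n : Int), w)).2 = w + greedy (sa.drop n) sb := by
  induction sb with
  | nil => intro n w; simp [greedy_nil_right]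
  | cons b bs ih =>
    intro n w
    rw [List.foldl_cons]
    by_cases hn : n < sa.length
    · rw [List.drop_eq_getElem_cons hn]
      by_cases hb : sa[n] < b
      · have hcond : ((n : Int) < (sa.length : Int)
            ∧ (PySem.List.pyGet? sa (n : Int)).getD 0 < b) := by
          refine ⟨by exact_mod_cast hn, ?_⟩
          rw [PySem.List.pyGet?_natCast, List.getElem?_eq_getElem hn]
          simpa using hb
        rw [if_pos hcond]
        have : ((n : Int) + 1, w + 1) = (((n + 1 : Nat) : Int), w + 1) := by push_cast; rfl
        rw [this, ih (n + 1) (w + 1)]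
        rw [show greedy (sa[n] :: List.drop (n + 1) sa) (b :: bs)
              = 1 + greedy (List.drop (n + 1) sa) bs from by rw [greedy, if_pos hb]]
        ring
      · have hcond : ¬ ((n : Int) < (sa.length : Int)
            ∧ (PySem.List.pyGet? sa (n : Int)).getD 0 < b) := by
          intro hc
          apply hb
          have := hc.2
          rw [PySem.List.pyGet?_natCast, List.getElem?_eq_getElem hn] at this
          simpa using this
        rw [if_neg hcond, ih n w]
        rw [show greedy (sa[n] :: List.drop (n + 1) sa) (b :: bs)
              = greedy (sa[n] :: List.drop (n + 1) sa) bs from by rw [greedy, if_neg hb]]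
        rw [List.drop_eq_getElem_cons hn]
    · have hdrop : sa.drop n = [] := List.drop_eq_nil_of_le (Nat.le_of_not_lt hn)
      have hcond : ¬ ((n : Int) < (sa.length : Int)
          ∧ (PySem.List.pyGet? sa (n : Int)).getD 0 < b) := by
        intro hc
        exact hn (by exact_mod_cast hc.1)
      rw [if_neg hcond, ih n w, hdrop]
      simp [greedy]

theorem alt_eq_greedy (A B : List Int) :
    solution_alt A B = greedy (PySem.List.sorted A (fun x => x) false) (PySem.List.sorted B (fun x => x) false) := by
  unfold solution_alt
  have h := alt_loop (PySem.List.sorted A (fun x => x) false)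
    (PySem.List.sorted B (fun x => x) false) 0 0
  simpa using h

-- ===== VERDICT (by name: the statement is the Claim_ definition above) =====
theorem solution_spec : Claim_equal_solution := by
  intro A B _
  unfold Spec_solution
  rw [solution_eq_greedy, alt_eq_greedy]
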